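-- pv_equiv track=rewrite | github.com/yasithdev/qpm-amrb-new | datasets/transforms.py | reindex_for_ood
-- ===== SOURCE A (Python) =====
-- from typing import List, Tuple
--
-- def reindex_for_ood(
--     targets: List[str],
--     ood: List[int],
-- ) -> List[str]:
--     ind_targets = [y for i, y in enumerate(targets) if i not in ood]
--     ood_targets = [y for i, y in enumerate(targets) if i in ood]
--     permuted_targets = ind_targets + ood_targets
--     return permuted_targets
-- ===== SOURCE B (Python) =====
-- from typing import List
--
-- def reindex_for_ood(
--     targets: List[str],
--     ood: List[int],
-- ) -> List[str]:
--     # Stable sort of the index permutation by the boolean key "is OOD":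
--     # stability keeps in-distribution indices first, each block in index order.
--     oset = set(ood)
--     order = sorted(range(len(targets)), key=lambda i: i in oset)
--     return [targets[i] for i in order]
-- ===== Notes on version B (the rewrite author's own statement) =====
-- stated objective: faster
-- what changed: Instead of A's two filtering passes that each test 'i in ood' against the list per element, B computes the output permutation explicitly: it stably sorts range(len(targets)) by the boolean key 'index in set(ood)' and gathers targets along that permutation.
import Mathlib
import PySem

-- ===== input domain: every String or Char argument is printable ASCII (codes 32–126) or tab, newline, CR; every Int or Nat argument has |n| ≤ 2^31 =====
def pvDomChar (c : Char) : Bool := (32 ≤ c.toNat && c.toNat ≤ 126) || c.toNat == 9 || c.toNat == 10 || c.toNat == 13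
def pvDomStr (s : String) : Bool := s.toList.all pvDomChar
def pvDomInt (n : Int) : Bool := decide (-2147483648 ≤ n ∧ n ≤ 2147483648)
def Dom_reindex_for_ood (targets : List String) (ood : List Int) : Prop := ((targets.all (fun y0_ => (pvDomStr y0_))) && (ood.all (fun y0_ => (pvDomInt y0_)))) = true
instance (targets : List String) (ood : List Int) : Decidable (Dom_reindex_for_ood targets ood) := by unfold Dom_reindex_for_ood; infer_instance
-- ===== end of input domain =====

-- B replaces A's two filtering passes by an explicitly computed permutation: a stable sort of
-- the index range by the boolean key "index is OOD", then a gather of targets along it (alternative algorithm).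


-- ===== PORT A =====
def reindex_for_ood (targets : List String) (ood : List Int) : List String :=
  let ind_targets := ((PySem.List.enumerate targets).filter (fun p => !(ood.contains p.1))).map (·.2)
  let ood_targets := ((PySem.List.enumerate targets).filter (fun p => ood.contains p.1)).map (·.2)
  ind_targets ++ ood_targets

-- ===== PORT B =====
-- targets[i] is ported as pyGetD with default "": every i comes from range(len(targets)), so it is in range.
def reindex_for_ood_alt (targets : List String) (ood : List Int) : List String :=
  let oset := PySem.Set.ofList ood
  let order := PySem.List.sorted (PySem.List.pyRange 0 (targets.length : Int) 1)
    (fun i => PySem.Set.contains oset i) false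
  order.map (fun i => PySem.List.pyGetD targets i "")

-- ===== PRECONDITION & SPEC =====
def Spec_reindex_for_ood (targets : List String) (ood : List Int) (out : List String) : Prop := out = reindex_for_ood_alt targets ood
instance (targets : List String) (ood : List Int) (out : List String) : Decidable (Spec_reindex_for_ood targets ood out) := by unfold Spec_reindex_for_ood; infer_instance

-- ===== CLAIM (what is proved, stated in full; the proofs are below) =====
def Claim_equal_reindex_for_ood : Prop := ∀ (targets : List String) (ood : List Int), Dom_reindex_for_ood targets ood → Spec_reindex_for_ood targets ood (reindex_for_ood targets ood)

-- ===== LEMMAS AND PROOFS =====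

theorem pv_contains_ofList (ood : List Int) (i : Int) :
    PySem.Set.contains (PySem.Set.ofList ood) i = ood.contains i := by
  have h := PySem.Set.mem_ofList (xs := ood) (y := i)
  simp only [PySem.Set.contains, List.contains_eq_mem]
  simp [h]

-- Inserting into a "falses ++ trues" list keeps that shape: a false-key element lands at the
-- end of the false block, a true-key element at the very end.
theorem pv_insertBy_bool {α : Type} (key : α → Bool) (x : α) (A B : List α)
    (hA : ∀ a ∈ A, key a = false) (hB : ∀ b ∈ B, key b = true) :
    PySem.List.insertBy (fun a b => decide (key a < key b)) x (A ++ B) =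
      if key x then A ++ B ++ [x] else A ++ x :: B := by
  by_cases hx : key x = true
  · rw [if_pos hx, PySem.List.insertBy_of_forall_not_before] <;> simp [hx]
  · rw [if_neg hx]
    induction A with
    | nil =>
      cases B with
      | nil => simp [PySem.List.insertBy]
      | cons b B' =>
        have hb : key b = true := hB b (by simp)
        simp [PySem.List.insertBy, Bool.lt_iff, hx, hb]
    | cons a A' ih =>
      have ha : key a = false := hA a (by simp)
      simp only [List.cons_append, PySem.List.insertBy]
      rw [if_neg (by simp [Bool.lt_iff, ha])]
      rw [ih (fun y hy => hA y (by simp [hy]))]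

-- Folding insertBy over xs from a partitioned accumulator yields the stable boolean partition.
theorem pv_foldl_insertBy_bool {α : Type} (key : α → Bool) (xs A B : List α)
    (hA : ∀ a ∈ A, key a = false) (hB : ∀ b ∈ B, key b = true) :
    xs.foldl (fun acc x => PySem.List.insertBy (fun a b => decide (key a < key b)) x acc) (A ++ B) =
      (A ++ xs.filter (fun x => !key x)) ++ (B ++ xs.filter key) := by
  induction xs generalizing A B with
  | nil => simp
  | cons x xs ih =>
    simp only [List.foldl_cons]
    rw [pv_insertBy_bool key x A B hA hB]
    by_cases hx : key x = true
    · rw [if_pos hx, List.append_assoc A B [x]]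
      rw [ih A (B ++ [x]) hA (by intro b hb; rcases List.mem_append.1 hb with h | h
                                 · exact hB b h
                                 · simp at h; subst h; exact hx)]
      simp [hx]
    · rw [if_neg hx]
      have : A ++ x :: B = (A ++ [x]) ++ B := by simp
      rw [this]
      rw [ih (A ++ [x]) B (by intro a ha; rcases List.mem_append.1 ha with h | h
                              · exact hA a h
                              · simp at h; subst h; simpa using hx) hB]
      simp [hx]

-- Python's stable sort with a boolean key IS the stable partition.
theorem pv_sorted_bool {α : Type} (key : α → Bool) (xs : List α) :
    PySem.List.sorted xs key false = xs.filter (fun x => !key x) ++ xs.filter key := by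
  have h := pv_foldl_insertBy_bool key xs [] [] (by simp) (by simp)
  simpa [PySem.List.sorted_eq_foldl_insertBy] using h

-- ===== VERDICT (by name: the statement is the Claim_ definition above) =====
theorem reindex_for_ood_spec : Claim_equal_reindex_for_ood := by
  intro targets ood _
  unfold Spec_reindex_for_ood reindex_for_ood reindex_for_ood_alt
  simp only []
  rw [pv_sorted_bool]
  have henum := PySem.List.enumerate_eq_map_pyRange (xs := targets) (d := "")
  rw [henum, List.map_append]
  simp only [List.filter_map, List.map_map, pv_contains_ofList, Function.comp_def, PySem.List.len]
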